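-- pv_equiv track=rewrite | github.com/Lookingforcommit/tardis_market_simulator | main.py | get_prices_above
-- ===== SOURCE A (Python) =====
-- def get_prices_above(lst, price):
--     lst = sorted(lst, reverse=True)
--     ans = []
--     for el in lst:
--         if price <= el:
--             ans.append(el)
--         else:
--             break
--     return ans
-- ===== SOURCE B (Python) =====
-- def get_prices_above(lst, price):
--     return sorted([x for x in lst if price <= x], reverse=True)
-- ===== Notes on version B (the rewrite author's own statement) =====
-- stated objective: simpler
-- what changed: B filters the qualifying elements first with a comprehension and then sorts only that subset descending, instead of sorting the whole list and scanning a prefix with an early break.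
import Mathlib
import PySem

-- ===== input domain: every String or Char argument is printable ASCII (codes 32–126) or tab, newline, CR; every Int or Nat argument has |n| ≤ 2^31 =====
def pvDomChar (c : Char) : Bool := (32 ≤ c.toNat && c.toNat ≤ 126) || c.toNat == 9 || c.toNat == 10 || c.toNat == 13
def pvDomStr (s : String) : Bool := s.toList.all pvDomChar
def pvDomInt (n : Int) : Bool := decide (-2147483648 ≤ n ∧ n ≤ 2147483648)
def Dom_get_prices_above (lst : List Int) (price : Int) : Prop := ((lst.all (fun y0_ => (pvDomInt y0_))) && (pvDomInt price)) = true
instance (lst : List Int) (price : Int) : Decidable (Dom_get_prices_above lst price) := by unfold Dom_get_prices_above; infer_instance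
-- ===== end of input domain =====

-- B filters the qualifying elements first and then sorts only that subset descending,
-- instead of sorting the whole list and scanning a prefix with an early break (simpler).

-- ===== PORT A =====
-- the 'for el in lst: … else: break' loop with accumulator ans
def pvALoop_get_prices_above (price : Int) (ans : List Int) : List Int → List Int
  | [] => ans
  | el :: rest => if price ≤ el then pvALoop_get_prices_above price (ans ++ [el]) rest else ans

def get_prices_above (lst : List Int) (price : Int) : List Int :=
  pvALoop_get_prices_above price [] (PySem.List.sorted lst (fun x => x) true)

-- ===== PORT B =====
def get_prices_above_alt (lst : List Int) (price : Int) : List Int :=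
  PySem.List.sorted (lst.filter (fun x => decide (price ≤ x))) (fun x => x) true

-- ===== PRECONDITION & SPEC =====
def Spec_get_prices_above (lst : List Int) (price : Int) (out : List Int) : Prop := out = get_prices_above_alt lst price
instance (lst : List Int) (price : Int) (out : List Int) : Decidable (Spec_get_prices_above lst price out) := by unfold Spec_get_prices_above; infer_instance

-- ===== CLAIM (what is proved, stated in full; the proofs are below) =====
def Claim_equal_get_prices_above : Prop := ∀ (lst : List Int) (price : Int), Dom_get_prices_above lst price → Spec_get_prices_above lst price (get_prices_above lst price)

-- ===== LEMMAS AND PROOFS =====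

-- the break loop is takeWhile
theorem pvALoop_eq_takeWhile (price : Int) (ans l : List Int) :
    pvALoop_get_prices_above price ans l = ans ++ l.takeWhile (fun x => decide (price ≤ x)) := by
  induction l generalizing ans with
  | nil => simp [pvALoop_get_prices_above]
  | cons el rest ih =>
    by_cases h : price ≤ el
    · simp [pvALoop_get_prices_above, List.takeWhile, h, ih]
    · simp [pvALoop_get_prices_above, List.takeWhile, h]

-- on a descending list, the prefix-takeWhile equals the filter
theorem takeWhile_eq_filter_of_desc (price : Int) (l : List Int)
    (hp : l.Pairwise (fun a b => b ≤ a)) :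
    l.takeWhile (fun x => decide (price ≤ x)) = l.filter (fun x => decide (price ≤ x)) := by
  induction l with
  | nil => rfl
  | cons a t ih =>
    rcases List.pairwise_cons.mp hp with ⟨ha, ht⟩
    by_cases h : price ≤ a
    · simp [List.takeWhile, List.filter, h, ih ht]
    · have : t.filter (fun x => decide (price ≤ x)) = [] := by
        apply List.filter_eq_nil_iff.mpr
        intro b hb
        simp only [decide_eq_true_eq]
        intro hpb
        exact h (le_trans hpb (ha b hb))
      simp [List.takeWhile, List.filter, h, this]

theorem get_prices_above_eq (lst : List Int) (price : Int) :
    get_prices_above lst price = get_prices_above_alt lst price := by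
  unfold get_prices_above get_prices_above_alt
  set s := PySem.List.sorted lst (fun x => x) true with hs
  have hpair : s.Pairwise (fun a b => b ≤ a) := PySem.List.sorted_pairwise_rev lst (fun x => x)
  rw [pvALoop_eq_takeWhile, List.nil_append,
      takeWhile_eq_filter_of_desc price s hpair]
  -- both sides: permutations of filter lst, both descending ⇒ equal
  exact List.Perm.eq_of_pairwise (le := fun a b : Int => b ≤ a)
    (fun a b _ _ h1 h2 => le_antisymm h2 h1)
    (hpair.sublist (List.filter_sublist (p := fun x => decide (price ≤ x)) (l := s)))
    (PySem.List.sorted_pairwise_rev _ (fun x => x))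
    (((PySem.List.sorted_perm lst (fun x => x) true).filter _).trans
      ((PySem.List.sorted_perm (lst.filter (fun x => decide (price ≤ x))) (fun x => x) true).symm))

-- ===== VERDICT (by name: the statement is the Claim_ definition above) =====
theorem get_prices_above_spec : Claim_equal_get_prices_above := by
  intro lst price _
  exact get_prices_above_eq lst price
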